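-- pv_equiv track=rewrite | github.com/Teng91/Computer-Programming | examples/estimate_carry.py | estimate_carry
-- ===== SOURCE A (Python) =====
-- def estimate_carry(a,b):
--     """Estimate the number of carries.
--     The estimated carry may be less than
--     the actual one."""
--     carry_count = 0
--     while a > 0 and b > 0:
--         a,digit_a = divmod(a,10)
--         b,digit_b = divmod(b,10)
--         if digit_a + digit_b > 9:
--             carry_count += 1
--     return carry_count
-- ===== SOURCE B (Python) =====
-- def estimate_carry(a, b):
--     digits_a = []
--     while a > 0:
--         a, d = divmod(a, 10)
--         digits_a.append(d)
--     digits_b = []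
--     while b > 0:
--         b, d = divmod(b, 10)
--         digits_b.append(d)
--     return sum(1 for da, db in zip(digits_a, digits_b) if da + db > 9)
-- ===== Notes on version B (the rewrite author's own statement) =====
-- stated objective: alternative
-- what changed: B extracts each number's digit list (LSB-first) independently and counts positions where zipped digit pairs sum above 9, instead of A's single interleaved while-loop with an accumulator.
import Mathlib
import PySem

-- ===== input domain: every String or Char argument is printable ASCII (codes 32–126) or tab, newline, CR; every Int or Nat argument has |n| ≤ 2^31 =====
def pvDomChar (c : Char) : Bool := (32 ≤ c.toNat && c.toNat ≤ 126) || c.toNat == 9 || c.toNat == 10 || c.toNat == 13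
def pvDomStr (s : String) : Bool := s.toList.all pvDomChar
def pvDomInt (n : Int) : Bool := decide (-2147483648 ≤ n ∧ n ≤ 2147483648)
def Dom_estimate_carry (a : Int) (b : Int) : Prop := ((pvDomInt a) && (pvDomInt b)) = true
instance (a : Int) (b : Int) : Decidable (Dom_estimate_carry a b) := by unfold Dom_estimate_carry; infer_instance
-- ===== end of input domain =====

-- B replaces A's single interleaved while-loop by two independent digit extractions and a
-- count over zipped digit pairs (objective: alternative decomposition, same cost).

-- termination helper used by both ports
theorem pv_floordiv10_toNat_lt {n : Int} (h : 0 < n) :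
    (PySem.Int.floordiv n 10).toNat < n.toNat := by
  rw [PySem.Int.floordiv_eq_ediv_of_pos (by omega)]
  omega

-- ===== PORT A =====
-- while a > 0 and b > 0: a,da = divmod(a,10); b,db = divmod(b,10); if da+db>9: carry += 1
def estimate_carry_loop (a : Int) (b : Int) (carry_count : Int) : Int :=
  if 0 < a ∧ 0 < b then
    estimate_carry_loop (PySem.Int.floordiv a 10) (PySem.Int.floordiv b 10)
      (if PySem.Int.mod a 10 + PySem.Int.mod b 10 > 9 then carry_count + 1 else carry_count)
  else carry_count
termination_by a.toNat
decreasing_by exact pv_floordiv10_toNat_lt (by omega)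

def estimate_carry (a : Int) (b : Int) : Int := estimate_carry_loop a b 0

-- ===== PORT B =====
-- while n > 0: n,d = divmod(n,10); digits.append(d)   (list is LSB-first)
def pyDigits (n : Int) : List Int :=
  if 0 < n then PySem.Int.mod n 10 :: pyDigits (PySem.Int.floordiv n 10) else []
termination_by n.toNat
decreasing_by exact pv_floordiv10_toNat_lt (by omega)

-- sum(1 for da,db in zip(digits_a, digits_b) if da+db > 9)
def estimate_carry_alt (a : Int) (b : Int) : Int :=
  ((pyDigits a).zip (pyDigits b)).foldl
    (fun acc p => if p.1 + p.2 > 9 then acc + 1 else acc) 0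

-- ===== PRECONDITION & SPEC =====
def Spec_estimate_carry (a : Int) (b : Int) (out : Int) : Prop := out = estimate_carry_alt a b
instance (a : Int) (b : Int) (out : Int) : Decidable (Spec_estimate_carry a b out) := by unfold Spec_estimate_carry; infer_instance

-- ===== CLAIM (what is proved, stated in full; the proofs are below) =====
def Claim_equal_estimate_carry : Prop := ∀ (a : Int) (b : Int), Dom_estimate_carry a b → Spec_estimate_carry a b (estimate_carry a b)

-- ===== LEMMAS AND PROOFS =====

theorem pv_foldl_shift (l : List (Int × Int)) (c : Int) :
    l.foldl (fun acc p => if p.1 + p.2 > 9 then acc + 1 else acc) c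
      = c + l.foldl (fun acc p => if p.1 + p.2 > 9 then acc + 1 else acc) 0 := by
  induction l generalizing c with
  | nil => simp
  | cons x xs ih =>
    simp only [List.foldl]
    rw [ih, ih (if x.1 + x.2 > 9 then 0 + 1 else 0)]
    split_ifs <;> ring

theorem pv_loop_eq (a b c : Int) :
    estimate_carry_loop a b c = c + estimate_carry_alt a b := by
  fun_induction estimate_carry_loop a b c with
  | case1 a b c h ih =>
    obtain ⟨ha, hb⟩ := h
    simp only [dite_eq_ite] at ih
    rw [ih]
    unfold estimate_carry_alt
    conv_rhs => rw [pyDigits, pyDigits.eq_def b, if_pos ha, if_pos hb]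
    simp only [List.zip_cons_cons, List.foldl]
    conv_rhs => rw [pv_foldl_shift]
    split_ifs <;> ring
  | case2 a b c h =>
    unfold estimate_carry_alt
    rcases not_and_or.mp h with ha | hb
    · rw [pyDigits, if_neg ha]; simp
    · rw [pyDigits.eq_def b, if_neg hb]; simp

-- ===== VERDICT (by name: the statement is the Claim_ definition above) =====
theorem estimate_carry_spec : Claim_equal_estimate_carry := by
  intro a b _
  unfold Spec_estimate_carry estimate_carry
  rw [pv_loop_eq]
  ring
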